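-- pv_equiv track=rewrite | github.com/nedzadZaciragic/mvp | focused_maps_test.py | count_restaurants_with_links
-- ===== SOURCE A (Python) =====
-- def count_restaurants_with_links(response):
--     """Count restaurant recommendations that have Google Maps links"""
--     # Look for restaurant patterns followed by maps links
--     lines = response.split('\n')
--     restaurant_count = 0
--
--     for i, line in enumerate(lines):
--         # Check if line contains restaurant indicators
--         if any(indicator in line.lower() for indicator in ['restaurant', '🍽️', '🍴', '**', 'cuisine']):
--             # Check if next few lines contain a Google Maps link
--             for j in range(i, min(i+3, len(lines))):
--                 if 'google.com/maps/search' in lines[j]: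
--                     restaurant_count += 1
--                     break
--
--     return restaurant_count
-- ===== SOURCE B (Python) =====
-- def count_restaurants_with_links(response):
--     """Count restaurant recommendations that have Google Maps links"""
--     indicators = ('restaurant', '\U0001f37d\ufe0f', '\U0001f374', '**', 'cuisine')
--     count = 0
--     gap = None  # lines between the current line and the nearest maps link at or after it
--     for line in reversed(response.split('\n')):
--         if 'google.com/maps/search' in line:
--             gap = 0
--         elif gap is not None:
--             gap += 1
--         if gap is not None and gap <= 2:
--             low = line.lower()
--             if any(ind in low for ind in indicators):
--                 count += 1
--     return count
-- ===== Notes on version B (the rewrite author's own statement) =====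
-- stated objective: alternative
-- what changed: Replaces the nested forward window scan (for each indicator line, rescan up to 3 lines for a maps link) with a single reverse pass that maintains the distance to the nearest maps link at-or-after the current line.
import Mathlib
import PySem

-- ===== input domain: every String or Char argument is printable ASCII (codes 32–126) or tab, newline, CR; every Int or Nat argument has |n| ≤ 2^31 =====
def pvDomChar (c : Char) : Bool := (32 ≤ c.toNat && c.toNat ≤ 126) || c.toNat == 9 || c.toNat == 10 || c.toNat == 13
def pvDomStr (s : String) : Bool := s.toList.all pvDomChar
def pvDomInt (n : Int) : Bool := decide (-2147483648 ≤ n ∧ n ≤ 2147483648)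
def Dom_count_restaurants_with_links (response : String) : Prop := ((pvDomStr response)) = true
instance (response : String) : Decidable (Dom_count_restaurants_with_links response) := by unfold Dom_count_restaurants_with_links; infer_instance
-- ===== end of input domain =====

-- B replaces A's nested bounded forward scan (rescan up to 3 lines per indicator line)
-- with one reverse pass maintaining the distance to the nearest maps link at-or-after.


-- ===== PORT A =====
-- any(indicator in line.lower() for indicator in [...])
def pvHasInd (line : String) : Bool :=
  ["restaurant", "🍽️", "🍴", "**", "cuisine"].any
    (fun ind => PySem.Str.isIn ind (PySem.Str.lower line))

-- 'google.com/maps/search' in s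
def pvHasLink (s : String) : Bool := PySem.Str.isIn "google.com/maps/search" s

-- the inner 'for j in range(i, min(i+3, len(lines)))' loop with its break
def pvAWindow (lines : List String) : List Int → Bool
  | [] => false
  | j :: js =>
      if pvHasLink (PySem.List.pyGetD lines j "") then true else pvAWindow lines js

def count_restaurants_with_links (response : String) : Int :=
  let lines := (PySem.Str.split? response "\n").getD []
  (PySem.List.enumerate lines 0).foldl
    (fun c p =>
      if pvHasInd p.2 then
        if pvAWindow lines (PySem.List.pyRange p.1 (min (p.1 + 3) (lines.length : Int)) 1)
        then c + 1 else c
      else c) 0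

-- ===== PORT B =====
-- one reversed-iteration step: update gap (lines to nearest link at-or-after), then count
def pvAltStep (line : String) (acc : Option Nat × Int) : Option Nat × Int :=
  let gap : Option Nat := if pvHasLink line then some 0 else acc.1.map (· + 1)
  let cnt : Int :=
    if (match gap with | some g => decide (g ≤ 2) | none => false) && pvHasInd line
    then acc.2 + 1 else acc.2
  (gap, cnt)

def count_restaurants_with_links_alt (response : String) : Int :=
  (((PySem.Str.split? response "\n").getD []).foldr pvAltStep (none, 0)).2

-- ===== PRECONDITION & SPEC =====
def Spec_count_restaurants_with_links (response : String) (out : Int) : Prop := out = count_restaurants_with_links_alt response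
instance (response : String) (out : Int) : Decidable (Spec_count_restaurants_with_links response out) := by unfold Spec_count_restaurants_with_links; infer_instance

-- ===== CLAIM (what is proved, stated in full; the proofs are below) =====
def Claim_equal_count_restaurants_with_links : Prop := ∀ (response : String), Dom_count_restaurants_with_links response → Spec_count_restaurants_with_links response (count_restaurants_with_links response)

-- ===== LEMMAS AND PROOFS =====

-- reference count: for each line, 1 if it has an indicator and a link appears within the next 3 lines
def pvARec : List String → Int
  | [] => 0
  | l :: rest =>
      (if pvHasInd l && ((l :: rest).take 3).any pvHasLink then 1 else 0) + pvARec rest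

-- the gap maintained by B tests exactly "a link within the next k+1 lines"
lemma pv_gap_le (xs : List String) (k : Nat) :
    (match (xs.foldr pvAltStep (none, 0)).1 with
      | some g => decide (g ≤ k) | none => false) = (xs.take (k + 1)).any pvHasLink := by
  induction xs generalizing k with
  | nil => simp
  | cons l rest ih =>
      by_cases h : pvHasLink l = true
      · simp [pvAltStep, h]
      · simp only [Bool.not_eq_true] at h
        cases k with
        | zero =>
            simp only [pvAltStep, h, List.foldr_cons, List.take_succ_cons, List.take_zero,
              List.any_cons, List.any_nil, Bool.or_false]
            cases (rest.foldr pvAltStep (none, 0)).1 <;> simp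
        | succ k' =>
            have := ih k'
            simp only [pvAltStep, h, List.foldr_cons, List.take_succ_cons, List.any_cons] at *
            cases hg : (rest.foldr pvAltStep (none, 0)).1 <;>
              · simp [hg] at this ⊢; omega

lemma pv_alt_eq_rec (xs : List String) :
    (xs.foldr pvAltStep (none, 0)).2 = pvARec xs := by
  induction xs with
  | nil => simp [pvARec]
  | cons l rest ih =>
      have hg := pv_gap_le (l :: rest) 2
      have hstep : (l :: rest).foldr pvAltStep (none, 0)
          = pvAltStep l (rest.foldr pvAltStep (none, 0)) := rfl
      have hfst : ((l :: rest).foldr pvAltStep (none, 0)).1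
          = (if pvHasLink l then some 0 else (rest.foldr pvAltStep (none, 0)).1.map (· + 1)) := rfl
      rw [pvARec, ← ih]
      show (pvAltStep l (rest.foldr pvAltStep (none, 0))).2 = _
      simp only [pvAltStep, ← hfst] at *
      rw [hg]
      cases hb : ((l :: rest).take 3).any pvHasLink <;>
        cases hi : pvHasInd l <;> simp <;> omega

-- A's inner window scan tests "a link within the next w lines from index i"
lemma pv_window (L : List String) (w i : Nat) :
    pvAWindow L (PySem.List.pyRange (i : Int) (min ((i : Int) + w) (L.length : Int)) 1)
      = ((L.drop i).take w).any pvHasLink := by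
  induction w generalizing i with
  | zero =>
      simp only [Nat.cast_zero]
      rw [PySem.List.pyRange_one_eq_nil (by omega)]
      simp [pvAWindow]
  | succ w' ih =>
      by_cases hi : i < L.length
      · have hlt : (i : Int) < min ((i : Int) + (w' + 1 : Nat)) (L.length : Int) := by
          push_cast; omega
        rw [PySem.List.pyRange_one_cons hlt]
        have hdrop : L.drop i = L[i] :: L.drop (i + 1) := List.drop_eq_getElem_cons hi
        have hget : PySem.List.pyGetD L (i : Int) "" = L[i] := by
          rw [PySem.List.pyGetD_natCast]; simp [hi]
        rw [pvAWindow, hget]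
        have harg : min ((i : Int) + (w' + 1 : Nat)) (L.length : Int)
            = min (((i + 1 : Nat) : Int) + (w' : Nat)) (L.length : Int) := by push_cast; ring_nf
        have hcast : (i : Int) + 1 = ((i + 1 : Nat) : Int) := by push_cast; ring
        by_cases h : pvHasLink L[i] = true
        · rw [if_pos h, hdrop, List.take_succ_cons, List.any_cons, h, Bool.true_or]
        · simp only [Bool.not_eq_true] at h
          rw [if_neg (by simp [h]), harg, hcast, ih (i + 1), hdrop,
            List.take_succ_cons, List.any_cons, h, Bool.false_or]
      · have hnil : min ((i : Int) + (w' + 1 : Nat)) (L.length : Int) ≤ (i : Int) := by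
          push_cast; omega
        rw [PySem.List.pyRange_one_eq_nil hnil]
        have : L.drop i = [] := List.drop_eq_nil_of_le (by omega)
        simp [pvAWindow, this]

-- A's enumerate-foldl over a suffix of L starting at index s accumulates pvARec of that suffix
lemma pv_a_foldl (L : List String) (sfx : List String) (s : Nat) (c : Int)
    (hdrop : L.drop s = sfx) :
    (PySem.List.enumerate sfx (s : Int)).foldl
      (fun c p =>
        if pvHasInd p.2 then
          if pvAWindow L (PySem.List.pyRange p.1 (min (p.1 + 3) (L.length : Int)) 1)
          then c + 1 else c
        else c) c = c + pvARec sfx := by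
  induction sfx generalizing s c with
  | nil => simp [pvARec]
  | cons l rest ih =>
      rw [PySem.List.enumerate_cons, List.foldl_cons]
      have hwin : pvAWindow L (PySem.List.pyRange (s : Int) (min ((s : Int) + 3) (L.length : Int)) 1)
          = ((l :: rest).take 3).any pvHasLink := by
        have h3 := pv_window L 3 s
        simpa [hdrop] using h3
      have hdrop' : L.drop (s + 1) = rest := by
        rw [← List.drop_drop, hdrop]; rfl
      have hcast : ((s : Int) + 1) = (((s + 1 : Nat)) : Int) := by push_cast; ring
      rw [hcast, ih (s + 1) _ hdrop']
      simp only [hwin]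
      rw [pvARec]
      cases hb : ((l :: rest).take 3).any pvHasLink <;>
        cases hi : pvHasInd l <;> simp <;> omega

-- ===== VERDICT (by name: the statement is the Claim_ definition above) =====
theorem count_restaurants_with_links_spec : Claim_equal_count_restaurants_with_links := by
  intro response _
  unfold Spec_count_restaurants_with_links count_restaurants_with_links count_restaurants_with_links_alt
  have h := pv_a_foldl ((PySem.Str.split? response "\n").getD []) ((PySem.Str.split? response "\n").getD []) 0 0 (by simp)
  simp only [Nat.cast_zero] at h
  rw [h, pv_alt_eq_rec]
  omega
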